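-- pv_equiv track=rewrite | github.com/afni/afni | src/python_scripts/afnipy/lib_apqc_tcsh.py | commentize
-- ===== SOURCE A (Python) =====
-- def commentize( x, fullwid=76, indent=0, padpre=0, padpost=0,
--                 REP_TIL=True):
--     '''Take a string and make it into a comment; indent uniformly, if
-- necessary.  Having '||' in a string (surrounded by whitespace) will
-- translate to starting a new line.
--
-- Inputs
-- ------
--
--     x : a string that is the cmd; should arranged into multiple lines
--         (for long commands). Don't need/shouldn't have EOL chars.
--
--     fullwid : can be any number of width; default is 76, since ' \'
--         gets added on to most lines.
--
--     indent : number of spaces to prepend to each line, if desired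
--
--     padpre : number of empty lines to affix beforehand
--
--     padpost : number of empty lines to affix after text
--
--     REP_TIL : replace any tilde '~' with a space at the end (may be
--         useful because the lines are stripped of surrounding white
--         space to start)
--
-- Returns
-- -------
--
--     string : output >=1 line string version of the original, but
--         spaced to not overrun the fullwid line width.  Can be
--         uniformly indented.  If the input x is only whitespace or
--         empty, then a null string is returned.
--
--     '''
--
--     y = x.split()
--
--     new = []
--     line = indent*' ' + '#'
--     lenstart = len(line)
--     for word in y:
--         if word == "||":
--             new.append(line)
--             line = indent*' ' + '#'
--         elif len(line) + len(word) < fullwid: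
--             line+= ' ' + word
--         else:
--             new.append(line)
--             line = indent*' ' + '#'
--             line+= ' ' + word
--     # and get the last line, if there is any text still there beyond
--     # just the starting stuff
--     if len(line) > lenstart :
--         new.append(line)
--
--     out = '\n'.join(new)
--
--     if padpre:
--         out = padpre*'\n'+out
--     if padpost:
--         out+= padpost*'\n'
--
--     if REP_TIL :
--         out = out.replace('~', ' ')
--
--     return out
-- ===== SOURCE B (Python) =====
-- def commentize(x, fullwid=76, indent=0, padpre=0, padpost=0, REP_TIL=True):
--     pre = indent * ' ' + '#'
--
--     # pass 1: split the word list into segments delimited by '||'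
--     segs = []
--     cur = []
--     for w in x.split():
--         if w == '||':
--             segs.append(cur)
--             cur = []
--         else:
--             cur.append(w)
--     segs.append(cur)
--
--     # pass 2: greedily pack each segment, deciding breaks from a running
--     # length counter and joining the words of a line only on emission
--     lines = []
--     last = len(segs) - 1
--     for i, seg in enumerate(segs):
--         buf = []
--         L = len(pre)
--         for w in seg:
--             if L + len(w) < fullwid:
--                 buf.append(w)
--                 L += 1 + len(w)
--             else:
--                 lines.append(' '.join([pre] + buf))
--                 buf = [w]
--                 L = len(pre) + 1 + len(w)
--         if i < last or buf:
--             lines.append(' '.join([pre] + buf))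
--
--     out = '\n' * padpre + '\n'.join(lines) + '\n' * padpost
--     if REP_TIL:
--         out = out.replace('~', ' ')
--     return out
-- ===== Notes on version B (the rewrite author's own statement) =====
-- stated objective: alternative
-- what changed: B first splits the word list into segments at the break token, then packs each segment deciding line breaks from a running length counter over buffered words (joined only on emission), and applies the pre/post padding unconditionally via string repetition, instead of A's single string-growing loop with conditional final flush and conditional pads.
import Mathlib
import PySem

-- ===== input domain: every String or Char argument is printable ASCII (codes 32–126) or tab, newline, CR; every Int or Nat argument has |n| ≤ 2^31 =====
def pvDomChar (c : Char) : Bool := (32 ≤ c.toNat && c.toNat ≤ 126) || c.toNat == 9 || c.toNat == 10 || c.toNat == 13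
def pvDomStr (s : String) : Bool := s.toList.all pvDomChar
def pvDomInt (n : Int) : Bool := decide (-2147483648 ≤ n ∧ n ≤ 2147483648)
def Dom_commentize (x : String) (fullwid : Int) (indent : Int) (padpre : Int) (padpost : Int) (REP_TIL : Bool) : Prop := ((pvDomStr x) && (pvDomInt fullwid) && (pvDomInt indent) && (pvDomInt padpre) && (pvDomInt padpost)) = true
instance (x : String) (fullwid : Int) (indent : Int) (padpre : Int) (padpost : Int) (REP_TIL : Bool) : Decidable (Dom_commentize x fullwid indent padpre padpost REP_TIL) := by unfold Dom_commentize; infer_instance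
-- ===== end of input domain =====

-- B re-decomposes A ('alternative'): split the word list into break-token-delimited segments first, then pack each
-- segment deciding line breaks from a running length counter, joining a line's words only on emission.

-- ===== PORT A =====
-- A's loop body: '||' flushes the line; else the strict width test grows it; else flush and restart with the word.
def commentizeStepA (fullwid : Int) (pre : List Char)
    (st : List (List Char) × List Char) (word : List Char) : List (List Char) × List Char :=
  if word = ['|', '|'] then (st.1 ++ [st.2], pre)
  else if (st.2.length : Int) + (word.length : Int) < fullwid then (st.1, st.2 ++ ' ' :: word)
  else (st.1 ++ [st.2], pre ++ ' ' :: word)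

def commentize (x : String) (fullwid : Int) (indent : Int) (padpre : Int) (padpost : Int) (REP_TIL : Bool) : String :=
  let y := PySem.Chars.split₀ x.toList
  let pre := List.replicate indent.toNat ' ' ++ ['#']   -- indent*' ': Python gives '' for indent ≤ 0, toNat matches exactly
  let lenstart := pre.length
  let st := y.foldl (commentizeStepA fullwid pre) ([], pre)
  let new := if lenstart < st.2.length then st.1 ++ [st.2] else st.1
  let out := PySem.Chars.join ['\n'] new
  let out := if padpre ≠ 0 then List.replicate padpre.toNat '\n' ++ out else out   -- n*'\n' is '' for n ≤ 0
  let out := if padpost ≠ 0 then out ++ List.replicate padpost.toNat '\n' else out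
  let out := if REP_TIL then PySem.Chars.replace out ['~'] [' '] else out
  String.ofList out

-- ===== PORT B =====
-- ' '.join([pre] + buf)
def commentizeJoinLine (pre : List Char) (buf : List (List Char)) : List Char :=
  PySem.Chars.join [' '] (pre :: buf)

-- B's inner packing step: running length counter L decides the break; words are buffered and joined on emission.
def commentizeStepB (fullwid : Int) (pre : List Char)
    (st : List (List Char) × List (List Char) × Int) (w : List Char) :
    List (List Char) × List (List Char) × Int :=
  if st.2.2 + (w.length : Int) < fullwid then (st.1, st.2.1 ++ [w], st.2.2 + 1 + (w.length : Int))
  else (st.1 ++ [commentizeJoinLine pre st.2.1], [w], (pre.length : Int) + 1 + (w.length : Int))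

def commentize_alt (x : String) (fullwid : Int) (indent : Int) (padpre : Int) (padpost : Int) (REP_TIL : Bool) : String :=
  let pre := List.replicate indent.toNat ' ' ++ ['#']
  let sp := (PySem.Chars.split₀ x.toList).foldl
      (fun (st : List (List (List Char)) × List (List Char)) w =>
        if w = ['|', '|'] then (st.1 ++ [st.2], []) else (st.1, st.2 ++ [w])) ([], [])
  let segs := sp.1 ++ [sp.2]
  let last : Int := (segs.length : Int) - 1
  let lines := (PySem.List.enumerate segs).foldl (fun lines iseg =>
      let st := iseg.2.foldl (commentizeStepB fullwid pre) (lines, [], (pre.length : Int))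
      if iseg.1 < last ∨ st.2.1 ≠ [] then st.1 ++ [commentizeJoinLine pre st.2.1] else st.1) []
  let out := List.replicate padpre.toNat '\n' ++ PySem.Chars.join ['\n'] lines
      ++ List.replicate padpost.toNat '\n'
  let out := if REP_TIL then PySem.Chars.replace out ['~'] [' '] else out
  String.ofList out

-- ===== PRECONDITION & SPEC =====
def Spec_commentize (x : String) (fullwid : Int) (indent : Int) (padpre : Int) (padpost : Int) (REP_TIL : Bool) (out : String) : Prop := out = commentize_alt x fullwid indent padpre padpost REP_TIL
instance (x : String) (fullwid : Int) (indent : Int) (padpre : Int) (padpost : Int) (REP_TIL : Bool) (out : String) : Decidable (Spec_commentize x fullwid indent padpre padpost REP_TIL out) := by unfold Spec_commentize; infer_instance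

-- ===== CLAIM (what is proved, stated in full; the proofs are below) =====
def Claim_equal_commentize : Prop := ∀ (x : String) (fullwid : Int) (indent : Int) (padpre : Int) (padpost : Int) (REP_TIL : Bool), Dom_commentize x fullwid indent padpre padpost REP_TIL → Spec_commentize x fullwid indent padpre padpost REP_TIL (commentize x fullwid indent padpre padpost REP_TIL)

-- ===== LEMMAS AND PROOFS =====

theorem joinLine_nil (pre : List Char) : commentizeJoinLine pre [] = pre := by
  simp [commentizeJoinLine, PySem.Chars.join, List.intercalate]

theorem joinLine_append : ∀ (buf : List (List Char)) (pre w : List Char),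
    commentizeJoinLine pre (buf ++ [w]) = commentizeJoinLine pre buf ++ ' ' :: w := by
  intro buf
  induction buf with
  | nil =>
    intro pre w
    simp [commentizeJoinLine, PySem.Chars.join, List.intercalate]
  | cons b rest ih =>
    intro pre w
    have h1 : commentizeJoinLine pre ((b :: rest) ++ [w])
        = pre ++ [' '] ++ commentizeJoinLine b (rest ++ [w]) := by
      simp [commentizeJoinLine, PySem.Chars.join_cons_cons]
    have h2 : commentizeJoinLine pre (b :: rest)
        = pre ++ [' '] ++ commentizeJoinLine b rest := by
      simp [commentizeJoinLine, PySem.Chars.join_cons_cons]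
    rw [h1, ih, h2]
    simp

theorem joinLine_length_le (buf : List (List Char)) (pre : List Char) :
    pre.length ≤ (commentizeJoinLine pre buf).length := by
  induction buf using List.reverseRecOn with
  | nil => simp [joinLine_nil]
  | append_singleton l w ih => rw [joinLine_append]; simp; omega

theorem joinLine_length_lt (buf : List (List Char)) (pre : List Char) (h : buf ≠ []) :
    pre.length < (commentizeJoinLine pre buf).length := by
  induction buf using List.reverseRecOn with
  | nil => exact absurd rfl h
  | append_singleton l w _ =>
    rw [joinLine_append]
    have := joinLine_length_le l pre
    simp; omega

-- packing a '||'-free segment: A's string-growing fold is B's counter fold followed by a join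
theorem pack_eq (fullwid : Int) (pre : List Char) :
    ∀ (seg : List (List Char)), (['|', '|'] ∉ seg) → ∀ (new : List (List Char)) (buf : List (List Char)),
    seg.foldl (commentizeStepA fullwid pre) (new, commentizeJoinLine pre buf)
      = ((seg.foldl (commentizeStepB fullwid pre) (new, buf, ((commentizeJoinLine pre buf).length : Int))).1,
         commentizeJoinLine pre (seg.foldl (commentizeStepB fullwid pre) (new, buf, ((commentizeJoinLine pre buf).length : Int))).2.1) := by
  intro seg
  induction seg with
  | nil => intro _ new buf; simp
  | cons w rest ih =>
    intro hbar new buf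
    have hw : w ≠ ['|', '|'] := by simp at hbar; exact Ne.symm hbar.1
    have hrest : ['|', '|'] ∉ rest := by simp at hbar; exact hbar.2
    simp only [List.foldl_cons]
    by_cases hc : ((commentizeJoinLine pre buf).length : Int) + (w.length : Int) < fullwid
    · have hA : commentizeStepA fullwid pre (new, commentizeJoinLine pre buf) w
          = (new, commentizeJoinLine pre (buf ++ [w])) := by
        simp [commentizeStepA, hw, hc, joinLine_append]
      have hlen : ((commentizeJoinLine pre buf).length : Int) + 1 + (w.length : Int)
          = ((commentizeJoinLine pre (buf ++ [w])).length : Int) := by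
        rw [joinLine_append]; simp; ring
      have hB : commentizeStepB fullwid pre (new, buf, ((commentizeJoinLine pre buf).length : Int)) w
          = (new, buf ++ [w], ((commentizeJoinLine pre (buf ++ [w])).length : Int)) := by
        simp only [commentizeStepB]; rw [if_pos hc, hlen]
      rw [hA, hB, ih hrest]
    · have hA : commentizeStepA fullwid pre (new, commentizeJoinLine pre buf) w
          = (new ++ [commentizeJoinLine pre buf], commentizeJoinLine pre [w]) := by
        have : commentizeJoinLine pre [w] = pre ++ ' ' :: w := by
          have := joinLine_append [] pre w
          simpa [joinLine_nil] using this
        simp [commentizeStepA, hw, hc, this]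
      have hlen : (pre.length : Int) + 1 + (w.length : Int)
          = ((commentizeJoinLine pre [w]).length : Int) := by
        have := joinLine_append [] pre w
        rw [show ([] : List (List Char)) ++ [w] = [w] by simp] at this
        rw [this, joinLine_nil]; simp; ring
      have hB : commentizeStepB fullwid pre (new, buf, ((commentizeJoinLine pre buf).length : Int)) w
          = (new ++ [commentizeJoinLine pre buf], [w], ((commentizeJoinLine pre [w]).length : Int)) := by
        simp only [commentizeStepB]; rw [if_neg hc, hlen]
      rw [hA, hB, ih hrest]

-- the segments of a word list (what B's first pass computes), recursively
def segsOf : List (List Char) → List (List (List Char))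
  | [] => [[]]
  | w :: ws => if w = ['|', '|'] then [] :: segsOf ws else (segsOf ws).modifyHead (w :: ·)

theorem segsOf_ne_nil (ws : List (List Char)) : segsOf ws ≠ [] := by
  cases ws with
  | nil => simp [segsOf]
  | cons w ws =>
    simp only [segsOf]
    split
    · simp
    · cases h : segsOf ws with
      | nil => exact absurd h (segsOf_ne_nil ws)
      | cons s t => simp [List.modifyHead]

theorem segsOf_no_bar (ws : List (List Char)) : ∀ seg ∈ segsOf ws, ['|', '|'] ∉ seg := by
  induction ws with
  | nil => intro seg h; simp [segsOf] at h; simp [h]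
  | cons w ws ih =>
    intro seg h
    simp only [segsOf] at h
    by_cases hw : w = ['|', '|']
    · rw [if_pos hw] at h
      rcases List.mem_cons.mp h with h | h
      · simp [h]
      · exact ih seg h
    · rw [if_neg hw] at h
      cases hs : segsOf ws with
      | nil => exact absurd hs (segsOf_ne_nil ws)
      | cons s t =>
        rw [hs] at h
        simp only [List.modifyHead] at h
        rcases List.mem_cons.mp h with h | h
        · subst h
          intro hmem
          rcases List.mem_cons.mp hmem with h' | h'
          · exact hw h'.symm
          · exact ih s (by rw [hs]; exact List.mem_cons_self) h'
        · exact ih seg (by rw [hs]; exact List.mem_cons_of_mem s h)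

-- B's splitting fold, named for the lemma below
def commentizeSplitStep (st : List (List (List Char)) × List (List Char)) (w : List Char) :
    List (List (List Char)) × List (List Char) :=
  if w = ['|', '|'] then (st.1 ++ [st.2], []) else (st.1, st.2 ++ [w])

theorem splitFold_segsOf : ∀ (ws : List (List Char)) (acc : List (List (List Char))) (cur : List (List Char)),
    (ws.foldl commentizeSplitStep (acc, cur)).1 ++ [(ws.foldl commentizeSplitStep (acc, cur)).2]
      = acc ++ (segsOf ws).modifyHead (cur ++ ·) := by
  intro ws
  induction ws with
  | nil => intro acc cur; simp [segsOf, List.modifyHead]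
  | cons w ws ih =>
    intro acc cur
    simp only [List.foldl_cons]
    by_cases hw : w = ['|', '|']
    · rw [show commentizeSplitStep (acc, cur) w = (acc ++ [cur], []) by simp [commentizeSplitStep, hw]]
      rw [ih]
      cases hs : segsOf ws with
      | nil => exact absurd hs (segsOf_ne_nil ws)
      | cons s t => simp [segsOf, hw, hs, List.modifyHead]
    · rw [show commentizeSplitStep (acc, cur) w = (acc, cur ++ [w]) by simp [commentizeSplitStep, hw]]
      rw [ih]
      cases hs : segsOf ws with
      | nil => exact absurd hs (segsOf_ne_nil ws)
      | cons s t => simp [segsOf, hw, hs, List.modifyHead]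

-- the words a segment list came from (what A iterates over)
def flatSegs : List (List (List Char)) → List (List Char)
  | [] => []
  | [s] => s
  | s :: rest => s ++ ['|', '|'] :: flatSegs rest

theorem flat_segsOf : ∀ (ws : List (List Char)), flatSegs (segsOf ws) = ws := by
  intro ws
  induction ws with
  | nil => simp [segsOf, flatSegs]
  | cons w ws ih =>
    by_cases hw : w = ['|', '|']
    · cases hs : segsOf ws with
      | nil => exact absurd hs (segsOf_ne_nil ws)
      | cons s t =>
        rw [show segsOf (w :: ws) = [] :: segsOf ws by simp [segsOf, hw]]
        rw [hs]
        rw [show flatSegs ([] :: s :: t) = [] ++ ['|', '|'] :: flatSegs (s :: t) from rfl]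
        rw [← hs, ih, hw]
        simp
    · cases hs : segsOf ws with
      | nil => exact absurd hs (segsOf_ne_nil ws)
      | cons s t =>
        rw [show segsOf (w :: ws) = (segsOf ws).modifyHead (w :: ·) by simp [segsOf, hw]]
        rw [hs]
        simp only [List.modifyHead]
        cases t with
        | nil =>
          rw [show flatSegs [w :: s] = w :: s from rfl]
          rw [hs] at ih
          rw [show flatSegs [s] = s from rfl] at ih
          rw [ih]
        | cons r t' =>
          rw [show flatSegs ((w :: s) :: r :: t') = (w :: s) ++ ['|', '|'] :: flatSegs (r :: t') from rfl]
          rw [hs] at ih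
          rw [show flatSegs (s :: r :: t') = s ++ ['|', '|'] :: flatSegs (r :: t') from rfl] at ih
          simp only [List.cons_append, ih]

-- the common recursive form: pack each segment, flush unconditionally except for the final one
def procSegs (fullwid : Int) (pre : List Char) : List (List (List Char)) → List (List Char) → List (List Char)
  | [], lines => lines
  | [seg], lines =>
      let st := seg.foldl (commentizeStepB fullwid pre) (lines, [], (pre.length : Int))
      if st.2.1 ≠ [] then st.1 ++ [commentizeJoinLine pre st.2.1] else st.1
  | seg :: rest, lines =>
      procSegs fullwid pre rest
        ((seg.foldl (commentizeStepB fullwid pre) (lines, [], (pre.length : Int))).1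
          ++ [commentizeJoinLine pre (seg.foldl (commentizeStepB fullwid pre) (lines, [], (pre.length : Int))).2.1])

-- A's whole loop plus its final conditional flush is procSegs over the segments
theorem A_proc (fullwid : Int) (pre : List Char) :
    ∀ (segs : List (List (List Char))), segs ≠ [] → (∀ s ∈ segs, ['|', '|'] ∉ s) → ∀ (new : List (List Char)),
    (if pre.length < ((flatSegs segs).foldl (commentizeStepA fullwid pre) (new, pre)).2.length
      then ((flatSegs segs).foldl (commentizeStepA fullwid pre) (new, pre)).1
        ++ [((flatSegs segs).foldl (commentizeStepA fullwid pre) (new, pre)).2]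
      else ((flatSegs segs).foldl (commentizeStepA fullwid pre) (new, pre)).1)
      = procSegs fullwid pre segs new := by
  intro segs
  induction segs with
  | nil => intro h; exact absurd rfl h
  | cons seg rest ih =>
    intro _ hbar new
    have hseg : ['|', '|'] ∉ seg := hbar seg List.mem_cons_self
    cases rest with
    | nil =>
      rw [show flatSegs [seg] = seg from rfl]
      have hp := pack_eq fullwid pre seg hseg new []
      rw [joinLine_nil] at hp
      rw [hp]
      set st := seg.foldl (commentizeStepB fullwid pre) (new, [], (pre.length : Int)) with hstdef
      by_cases hb : st.2.1 = []
      · simp [procSegs, hb, joinLine_nil, ← hstdef]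
      · have := joinLine_length_lt st.2.1 pre hb
        simp [procSegs, hb, this, ← hstdef]
    | cons r t =>
      rw [show flatSegs (seg :: r :: t) = seg ++ ['|', '|'] :: flatSegs (r :: t) from rfl]
      rw [List.foldl_append]
      have hp := pack_eq fullwid pre seg hseg new []
      rw [joinLine_nil] at hp
      rw [hp]
      simp only [List.foldl_cons]
      rw [show commentizeStepA fullwid pre
          ((seg.foldl (commentizeStepB fullwid pre) (new, [], (pre.length : Int))).1,
            commentizeJoinLine pre (seg.foldl (commentizeStepB fullwid pre) (new, [], (pre.length : Int))).2.1) ['|', '|']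
          = ((seg.foldl (commentizeStepB fullwid pre) (new, [], (pre.length : Int))).1
              ++ [commentizeJoinLine pre (seg.foldl (commentizeStepB fullwid pre) (new, [], (pre.length : Int))).2.1], pre)
        by simp [commentizeStepA]]
      rw [ih (by simp) (fun s hs => hbar s (List.mem_cons_of_mem seg hs))]
      rfl

-- B's enumerate fold with the 'i < last' test is procSegs
theorem B_proc (fullwid : Int) (pre : List Char) :
    ∀ (segs : List (List (List Char))) (s T : Int), segs ≠ [] → T = s + (segs.length : Int) - 1 →
    ∀ (lines : List (List Char)),
    (PySem.List.enumerate segs s).foldl (fun lines iseg =>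
        let st := iseg.2.foldl (commentizeStepB fullwid pre) (lines, [], (pre.length : Int))
        if iseg.1 < T ∨ st.2.1 ≠ [] then st.1 ++ [commentizeJoinLine pre st.2.1] else st.1) lines
      = procSegs fullwid pre segs lines := by
  intro segs
  induction segs with
  | nil => intro s T h; exact absurd rfl h
  | cons seg rest ih =>
    intro s T _ hT lines
    rw [PySem.List.enumerate_cons]
    simp only [List.foldl_cons]
    cases rest with
    | nil =>
      have hns : ¬ (s < T) := by simp at hT; omega
      rw [PySem.List.enumerate_nil]
      simp only [List.foldl_nil, hns, false_or]
      rfl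
    | cons r t =>
      have hs : s < T := by
        simp only [List.length_cons] at hT
        push_cast at hT
        omega
      simp only [hs, true_or, if_true]
      rw [ih (s + 1) T (by simp) (by simp only [List.length_cons] at hT ⊢; push_cast at hT ⊢; omega)]
      rfl

-- ===== VERDICT (by name: the statement is the Claim_ definition above) =====
theorem commentize_spec : Claim_equal_commentize := by
  intro x fullwid indent padpre padpost REP_TIL _
  unfold Spec_commentize commentize commentize_alt
  simp only []
  set y := PySem.Chars.split₀ x.toList with hy
  set pre := List.replicate indent.toNat ' ' ++ ['#'] with hpre
  -- B's segments are segsOf y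
  have hsplit : (y.foldl (fun (st : List (List (List Char)) × List (List Char)) w =>
        if w = ['|', '|'] then (st.1 ++ [st.2], []) else (st.1, st.2 ++ [w])) ([], [])).1
      ++ [(y.foldl (fun (st : List (List (List Char)) × List (List Char)) w =>
        if w = ['|', '|'] then (st.1 ++ [st.2], []) else (st.1, st.2 ++ [w])) ([], [])).2]
      = segsOf y := by
    have h := splitFold_segsOf y [] []
    have hstep : (fun (st : List (List (List Char)) × List (List Char)) w =>
        if w = ['|', '|'] then (st.1 ++ [st.2], []) else (st.1, st.2 ++ [w])) = commentizeSplitStep := by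
      funext st w; simp [commentizeSplitStep]
    rw [hstep]
    rw [h]
    cases hs : segsOf y with
    | nil => exact absurd hs (segsOf_ne_nil y)
    | cons a b => simp [List.modifyHead]
  rw [hsplit]
  -- both line lists equal procSegs
  have hB := B_proc fullwid pre (segsOf y) 0 ((((segsOf y).length : Int)) - 1)
    (segsOf_ne_nil y) (by ring) []
  rw [hB]
  have hA := A_proc fullwid pre (segsOf y) (segsOf_ne_nil y) (segsOf_no_bar y) []
  rw [flat_segsOf] at hA
  rw [hA]
  -- padding: the conditional pads equal the unconditional ones
  congr 1
  by_cases h1 : padpre = 0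
  · by_cases h2 : padpost = 0
    · simp [h1, h2]
    · simp [h1, h2]
  · by_cases h2 : padpost = 0
    · simp [h1, h2]
    · simp [h1, h2]
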